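-- pv_equiv track=rewrite | github.com/dolpuru/dds_with_python | hjk/프로그래머스/lv2/오픈채팅방.py | solution
-- ===== SOURCE A (Python) =====
-- def solution(record): # uid의 수정을 다 마친 다음 포맷팅으로 넣어줄 것. 모든 리스트엔 uid가 들어간다., uid가 무조건 소문자라는 조건은 없었다... 문제를 잘 읽어보자 ....
--
--
--     def find_uid_and_name( record_i, option):
--         temp_uid = ""
--         temp_name = ""
--         first_blank = record_i.find(" ")
--         length = len(record_i)
--         if option == "F":
--             temp_name = record_i[first_blank+1:]
--         else:
--             first_blank = record_i.find(" ")
--             for temp in range(first_blank+1, length):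
--                     if record_i[temp] == " ":
--                         temp_name = record_i[temp+1:]
--                         break
--                     else:
--                         temp_uid += record_i[temp]
--
--             return temp_uid, temp_name
--
--     answer = []
--     uid_list = {}
--     length = len(record)
--
--     for i in range(length):
--
--
--         if record[i][0] == "E":
--             temp_uid, temp_name = find_uid_and_name(record[i], "E")
--             uid_list[temp_uid] = temp_name
--
--
--         elif record[i][0] == "C":
--             temp_uid, temp_name = find_uid_and_name(record[i],"C")
--             uid_list[temp_uid] = temp_name
--
--     for i in range(length):
--
--         if record[i][0] == "E":
--             temp_uid, temp_name = find_uid_and_name(record[i],"E")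
--             answer.append(f"{uid_list[temp_uid]}님이 들어왔습니다.")
--
--         elif record[i][0] == "L":
--             temp_uid, temp_name = find_uid_and_name(record[i],"L")
--             answer.append(f"{uid_list[temp_uid]}님이 나갔습니다.")
--
--     return answer
-- ===== SOURCE B (Python) =====
-- def solution(record):
--     def parse(r):
--         cmd, _, rest = r.partition(" ")
--         uid, _, name = rest.partition(" ")
--         return cmd[:1], uid, name
--
--     parsed = [parse(r) for r in record]
--
--     def final_name(uid):
--         # last-write-wins: the final name is the name of the last Enter/Change
--         # event carrying this uid, found by a backwards search (no dict).
--         for c, u, name in reversed(parsed):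
--             if c in ("E", "C") and u == uid:
--                 return name
--
--     answer = []
--     for c, uid, _ in parsed:
--         if c == "E":
--             answer.append(final_name(uid) + "님이 들어왔습니다.")
--         elif c == "L":
--             answer.append(final_name(uid) + "님이 나갔습니다.")
--     return answer
-- ===== Notes on version B (the rewrite author's own statement) =====
-- stated objective: alternative
-- what changed: B removes A's mutable uid->name dict entirely: it parses each record once into (cmd, uid, name) events and computes each message's final name by a backwards linear search over the event list (last-write-wins), instead of A's first pass that re-parses every raw string to fill a dict and second pass that re-parses again to look it up.
-- outside the precondition, e.g. on solution(['E  n', 'E']): A returns ['n님이 들어왔습니다.', '님이 들어왔습니다.'], B returns ['님이 들어왔습니다.', '님이 들어왔습니다.']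
import Mathlib
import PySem

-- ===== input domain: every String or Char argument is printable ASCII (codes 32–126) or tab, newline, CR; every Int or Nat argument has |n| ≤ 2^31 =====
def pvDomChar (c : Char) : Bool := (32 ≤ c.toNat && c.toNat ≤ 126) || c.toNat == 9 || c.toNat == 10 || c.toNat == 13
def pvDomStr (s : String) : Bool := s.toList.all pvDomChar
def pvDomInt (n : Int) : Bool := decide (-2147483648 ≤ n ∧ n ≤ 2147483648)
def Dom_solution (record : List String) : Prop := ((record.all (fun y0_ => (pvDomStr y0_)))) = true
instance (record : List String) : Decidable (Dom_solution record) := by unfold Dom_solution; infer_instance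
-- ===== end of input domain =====

-- B drops A's mutable uid→name dict: it parses each record once into (cmd, uid, name) events and
-- finds each message's final name by a backwards last-write-wins search over the events
-- (alternative decomposition, not faster).

-- ===== PORT A =====
-- A's helper find_uid_and_name: its `option == "F"` branch is dead (all call sites pass
-- "E"/"C"/"L", and that branch falls off returning None), so only the else-branch is ported:
-- the `for temp in range(first_blank+1, length)` character scan with break.
def solutionGoA (cs : List Char) (idxs : List Int) (uid : List Char) : List Char × List Char :=
  match idxs with
  | [] => (uid, [])
  | t :: rest =>
    match PySem.List.pyGet? cs t with
    | none => (uid, [])   -- IndexError: unreachable, pyRange indices are in range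
    | some ch =>
      if ch = ' ' then (uid, PySem.Chars.slice cs (some (t + 1)) none)   -- record_i[temp+1:], then break
      else solutionGoA cs rest (uid ++ [ch])                             -- temp_uid += record_i[temp]

def findUidAndName (cs : List Char) : List Char × List Char :=
  let firstBlank := PySem.Chars.find cs [' ']
  solutionGoA cs (PySem.List.pyRange (firstBlank + 1) (cs.length : Int)) []

def stepA1 (d : PySem.Dict (List Char) (List Char)) (r : String) : PySem.Dict (List Char) (List Char) :=
  match PySem.Str.pyGet? r 0 with
  | none => d          -- IndexError on record[i][0]: excluded by Pre_solution
  | some c =>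
    if c = 'E' then
      let p := findUidAndName r.toList; d.insert p.1 p.2
    else if c = 'C' then
      let p := findUidAndName r.toList; d.insert p.1 p.2
    else d

def stepA2 (uidList : PySem.Dict (List Char) (List Char)) (ans : List String) (r : String) : List String :=
  match PySem.Str.pyGet? r 0 with
  | none => ans        -- IndexError on record[i][0]: excluded by Pre_solution
  | some c =>
    if c = 'E' then
      -- uid_list[temp_uid]: KeyError excluded by Pre_solution (getD default unreachable there)
      ans ++ [String.ofList ((uidList.get? (findUidAndName r.toList).1).getD [] ++ "님이 들어왔습니다.".toList)]
    else if c = 'L' then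
      ans ++ [String.ofList ((uidList.get? (findUidAndName r.toList).1).getD [] ++ "님이 나갔습니다.".toList)]
    else ans

def solution (record : List String) : List String :=
  let uidList := record.foldl stepA1 PySem.Dict.empty
  record.foldl (stepA2 uidList) []

-- ===== PORT B =====
-- str.partition(" ") (no PySem primitive): exact for the single-character separator " ",
-- whose first occurrence is the first ' ' char; returns (part before, part after) —
-- B discards the middle component.
def pyPartitionSpace (cs : List Char) : List Char × List Char :=
  (cs.takeWhile (fun c => c ≠ ' '), (cs.dropWhile (fun c => c ≠ ' ')).tail)

def parseB (r : String) : List Char × List Char × List Char :=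
  let p1 := pyPartitionSpace r.toList
  let p2 := pyPartitionSpace p1.2
  (p1.1.take 1, p2.1, p2.2)

-- `for c, u, name in reversed(parsed): if …: return name` — find? over the reversed list;
-- the Python falls through returning None on no match (then `None + str` raises TypeError,
-- excluded by Pre_solution; the caller's getD default is unreachable there)
def finalNameB (parsed : List (List Char × List Char × List Char)) (uid : List Char) :
    Option (List Char) :=
  (parsed.reverse.find? (fun e => (e.1 == ['E'] || e.1 == ['C']) && e.2.1 == uid)).map
    (fun e => e.2.2)

def stepBemit (parsed : List (List Char × List Char × List Char)) (ans : List String)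
    (e : List Char × List Char × List Char) : List String :=
  if e.1 = ['E'] then
    ans ++ [String.ofList ((finalNameB parsed e.2.1).getD [] ++ "님이 들어왔습니다.".toList)]
  else if e.1 = ['L'] then
    ans ++ [String.ofList ((finalNameB parsed e.2.1).getD [] ++ "님이 나갔습니다.".toList)]
  else ans

def solution_alt (record : List String) : List String :=
  let parsed := record.map parseB
  parsed.foldl (stepBemit parsed) []

-- ===== PRECONDITION & SPEC =====
-- the uid field of a record: what stands between the first space and the next one
def uidField (r : String) : List Char :=
  ((r.toList.dropWhile (fun c => c ≠ ' ')).tail).takeWhile (fun c => c ≠ ' ')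

-- the Enter/Change records WITHOUT any space (malformed: no uid field), as raw strings
def slRec (record : List String) : List (List Char) :=
  record.filterMap (fun s =>
    if (s.toList.head? = some 'E' ∨ s.toList.head? = some 'C') ∧ ' ' ∉ s.toList
    then some s.toList else none)

-- the uid fields of the Enter/Change records WITH a space
def suRec (record : List String) : List (List Char) :=
  record.filterMap (fun s =>
    if (s.toList.head? = some 'E' ∨ s.toList.head? = some 'C') ∧ ' ' ∈ s.toList
    then some (uidField s) else none)

-- Pre_ excludes: empty record strings (A raises IndexError on record[i][0]); L-records without a
-- space or whose uid field matches no spaced Enter/Change record (A raises KeyError, or B does);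
-- and inputs where a spaced Enter/Change uid field collides with a spaceless Enter/Change record
-- (whole string vs empty uid: A keys its map by the whole record string where B's search keys
-- events by the empty uid — a malformed-record corner on which either value is accidental).
def Pre_solution (record : List String) : Prop :=
  (∀ r ∈ record, r.toList ≠ [] ∧
    (r.toList.head? = some 'L' → ' ' ∈ r.toList ∧ uidField r ∈ suRec record) ∧
    ((r.toList.head? = some 'E' ∨ r.toList.head? = some 'C') → ' ' ∈ r.toList →
      uidField r ∉ slRec record)) ∧
  (slRec record ≠ [] → [] ∉ suRec record)
instance (record : List String) : Decidable (Pre_solution record) := by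
  unfold Pre_solution; infer_instance

def pvWitness_solution : List String := ["Enter u1 Muzi", "Change u1 Ryan", "Leave u1"]

def Spec_solution (record : List String) (out : List String) : Prop := out = solution_alt record
instance (record : List String) (out : List String) : Decidable (Spec_solution record out) := by
  unfold Spec_solution; infer_instance

-- ===== CLAIM (what is proved, stated in full; the proofs are below) =====
def Claim_equal_solution : Prop :=
  ∀ (record : List String), Dom_solution record → Pre_solution record →
    Spec_solution record (solution record)

-- ===== LEMMAS AND PROOFS =====

-- a singleton prefix is the first element
lemma singleton_prefix_iff (x : Char) (l : List Char) : [x] <+: l ↔ l[0]? = some x := by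
  constructor
  · rintro ⟨t, rfl⟩; rfl
  · intro h; cases l with
    | nil => simp at h
    | cons y t => simp at h; exact ⟨t, by simp [h]⟩

-- dropping the spaceless prefix is dropWhile
lemma drop_takeWhile_len (cs : List Char) :
    cs.drop (cs.takeWhile (fun c => c ≠ ' ')).length = cs.dropWhile (fun c => c ≠ ' ') := by
  have h2 : (cs.takeWhile (fun c => c ≠ ' ') ++ cs.dropWhile (fun c => c ≠ ' ')).drop
      (cs.takeWhile (fun c => c ≠ ' ')).length = cs.dropWhile (fun c => c ≠ ' ') :=
    List.drop_left
  rwa [List.takeWhile_append_dropWhile] at h2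

-- position of the first space, stated on the raw list
lemma takeWhile_space_facts : ∀ (cs : List Char), ' ' ∈ cs →
    cs[(cs.takeWhile (fun c => c ≠ ' ')).length]? = some ' ' ∧
    ∀ i < (cs.takeWhile (fun c => c ≠ ' ')).length, cs[i]? ≠ some ' ' := by
  intro cs
  induction cs with
  | nil => intro h; simp at h
  | cons x t ih =>
    intro h
    by_cases hx : x = ' '
    · subst hx; simp
    · have hmem : ' ' ∈ t := by
        rcases List.mem_cons.1 h with h1 | h1
        · exact absurd h1.symm hx
        · exact h1
      obtain ⟨h1, h2⟩ := ih hmem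
      have htw : (x :: t).takeWhile (fun c => c ≠ ' ') = x :: t.takeWhile (fun c => c ≠ ' ') := by
        simp [hx]
      rw [htw]
      refine ⟨by simpa using h1, ?_⟩
      intro i hi
      cases i with
      | zero => simp [hx]
      | succ j =>
        simp only [List.length_cons, Nat.succ_lt_succ_iff] at hi
        simpa using h2 j hi

-- first space: find's value is the length of the spaceless prefix
lemma find_space (cs : List Char) (h : ' ' ∈ cs) :
    PySem.Chars.find cs [' '] = ((cs.takeWhile (fun c => c ≠ ' ')).length : Int) := by
  obtain ⟨hk, hmin⟩ := takeWhile_space_facts cs h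
  set k := (cs.takeWhile (fun c => c ≠ ' ')).length with hkdef
  have hpre_k : [' '] <+: cs.drop k := by
    rw [singleton_prefix_iff]
    rw [List.getElem?_drop]
    simpa using hk
  have hnn : 0 ≤ PySem.Chars.find cs [' '] := by
    rw [PySem.Chars.find_nonneg_iff, ← PySem.Chars.isIn_iff_infix,
      ← PySem.Chars.exists_prefix_drop_iff_isIn]
    exact ⟨k, hpre_k⟩
  obtain ⟨hpre, hmn⟩ := PySem.Chars.find_spec hnn
  set j := (PySem.Chars.find cs [' ']).toNat with hjdef
  have hj : cs[j]? = some ' ' := by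
    have := (singleton_prefix_iff _ _).1 hpre
    rw [List.getElem?_drop] at this
    simpa using this
  have hjk : j = k := by
    rcases Nat.lt_trichotomy j k with hlt | heq | hgt
    · exact absurd hj (hmin j hlt)
    · exact heq
    · exact absurd hpre_k (hmn k hgt)
  omega

-- no space: find returns -1
lemma find_nospace (cs : List Char) (h : ' ' ∉ cs) : PySem.Chars.find cs [' '] = -1 := by
  rw [PySem.Chars.find_eq_neg_one_iff]
  intro hinf
  exact h (hinf.subset (by simp))

-- the character scan of find_uid_and_name, started at index p with accumulator u
lemma goA_spec (cs : List Char) : ∀ (p : Nat) (u : List Char),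
    solutionGoA cs (PySem.List.pyRange (p : Int) (cs.length : Int)) u
      = (u ++ (cs.drop p).takeWhile (fun c => c ≠ ' '),
         ((cs.drop p).dropWhile (fun c => c ≠ ' ')).tail) := by
  suffices H : ∀ (n p : Nat), cs.length - p = n → ∀ u,
      solutionGoA cs (PySem.List.pyRange (p : Int) (cs.length : Int)) u
        = (u ++ (cs.drop p).takeWhile (fun c => c ≠ ' '),
           ((cs.drop p).dropWhile (fun c => c ≠ ' ')).tail) by
    intro p u; exact H (cs.length - p) p rfl u
  intro n
  induction n with
  | zero =>
    intro p hp u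
    have hle : cs.length ≤ p := by omega
    have h1 : PySem.List.pyRange (p : Int) (cs.length : Int) = [] := by
      simp [PySem.List.pyRange]; omega
    have h2 : cs.drop p = [] := List.drop_eq_nil_of_le hle
    rw [h1, h2]
    simp [solutionGoA]
  | succ n ih =>
    intro p hp u
    have hlt : p < cs.length := by omega
    rw [PySem.List.pyRange_one_cons (by exact_mod_cast hlt)]
    have hget : PySem.List.pyGet? cs (p : Int) = some cs[p] := by
      rw [PySem.List.pyGet?_natCast]
      simp [hlt]
    have hdrop : cs.drop p = cs[p] :: cs.drop (p + 1) := List.drop_eq_getElem_cons hlt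
    by_cases hx : cs[p] = ' '
    · simp only [solutionGoA, hget, hx]
      have hsl : PySem.Chars.slice cs (some ((p : Int) + 1)) none = cs.drop (p + 1) := by
        have : ((p : Int) + 1) = ((p + 1 : Nat) : Int) := by push_cast; ring
        rw [this, PySem.Chars.slice_eq_listSlice, PySem.List.slice_from cs (by positivity)]
        simp
      rw [hsl, hdrop]
      simp [hx]
    · simp only [solutionGoA, hget, hx]
      have hcast : ((p : Int) + 1) = ((p + 1 : Nat) : Int) := by push_cast; ring
      rw [hcast, ih (p + 1) (by omega) (u ++ [cs[p]])]
      have h1 : (cs.drop p).takeWhile (fun c => c ≠ ' ')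
          = cs[p] :: (cs.drop (p + 1)).takeWhile (fun c => c ≠ ' ') := by
        rw [hdrop, List.takeWhile_cons_of_pos (by simp [hx])]
      have h2 : (cs.drop p).dropWhile (fun c => c ≠ ' ')
          = (cs.drop (p + 1)).dropWhile (fun c => c ≠ ' ') := by
        rw [hdrop, List.dropWhile_cons_of_pos (by simp [hx])]
      rw [h1, h2]
      simp

-- on any record containing a space, A's parse agrees with B's double partition
lemma parse_eq (cs : List Char) (h : ' ' ∈ cs) :
    findUidAndName cs = pyPartitionSpace ((pyPartitionSpace cs).2) := by
  show solutionGoA cs (PySem.List.pyRange (PySem.Chars.find cs [' '] + 1) (cs.length : Int)) []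
      = pyPartitionSpace ((pyPartitionSpace cs).2)
  rw [find_space cs h]
  have hc : (((cs.takeWhile (fun c => c ≠ ' ')).length : Int) + 1)
      = (((cs.takeWhile (fun c => c ≠ ' ')).length + 1 : Nat) : Int) := by push_cast; ring
  rw [hc, goA_spec cs ((cs.takeWhile (fun c => c ≠ ' ')).length + 1) []]
  have hrest : cs.drop ((cs.takeWhile (fun c => c ≠ ' ')).length + 1)
      = (cs.dropWhile (fun c => c ≠ ' ')).tail := by
    rw [← List.tail_drop, drop_takeWhile_len]
  rw [hrest]
  simp [pyPartitionSpace]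

-- without a space, partition keeps the whole string on the left
lemma partition_nospace (cs : List Char) (h : ' ' ∉ cs) : pyPartitionSpace cs = (cs, []) := by
  unfold pyPartitionSpace
  have h1 : cs.takeWhile (fun c => c ≠ ' ') = cs := by
    rw [List.takeWhile_eq_self_iff]
    intro a ha
    simp only [decide_eq_true_eq]
    rintro rfl; exact h ha
  have h2 : cs.dropWhile (fun c => c ≠ ' ') = [] := by
    rw [List.dropWhile_eq_nil_iff]
    intro a ha
    simp only [decide_eq_true_eq]
    rintro rfl; exact h ha
  rw [h1, h2]
  rfl

-- without a space, A's scan takes the whole string as the uid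
lemma parse_nospace (cs : List Char) (h : ' ' ∉ cs) : findUidAndName cs = (cs, []) := by
  show solutionGoA cs (PySem.List.pyRange (PySem.Chars.find cs [' '] + 1) (cs.length : Int)) []
      = (cs, [])
  rw [find_nospace cs h]
  have h0 : (-1 : Int) + 1 = ((0 : Nat) : Int) := by norm_num
  rw [h0, goA_spec cs 0 []]
  have hp := partition_nospace cs h
  unfold pyPartitionSpace at hp
  have h1 : cs.takeWhile (fun c => c ≠ ' ') = cs := congrArg Prod.fst hp
  have h2 : ((cs.dropWhile (fun c => c ≠ ' ')).tail) = [] := congrArg Prod.snd hp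
  simp only [List.drop_zero, List.nil_append]
  rw [h1, h2]

-- B's uid component is the uid field
lemma parseB_uid (r : String) : (parseB r).2.1 = uidField r := rfl

-- B's parse of a spaceless record
lemma parseB_nospace (r : String) (h : ' ' ∉ r.toList) :
    parseB r = (r.toList.take 1, [], []) := by
  unfold parseB
  rw [partition_nospace r.toList h]
  rfl

-- record[i][0] is the head of the character list
lemma pyGet0 (r : String) : PySem.Str.pyGet? r 0 = r.toList.head? := by
  have h0 : (0 : Int) = ((0 : Nat) : Int) := rfl
  rw [h0, PySem.Str.pyGet?_natCast, List.head?_eq_getElem?]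

lemma take1_head (x : Char) (t : List Char) (hx : x ≠ ' ') :
    ((x :: t).takeWhile (fun c => c ≠ ' ')).take 1 = [x] := by
  rw [List.takeWhile_cons_of_pos (by simp [hx])]
  rfl

-- B's cmd component, for a nonempty record
lemma parseB_cmd (r : String) (x : Char) (t : List Char) (h : r.toList = x :: t) :
    (parseB r).1 = if x = ' ' then [] else [x] := by
  show ((r.toList.takeWhile (fun c => c ≠ ' '))).take 1 = _
  by_cases hx : x = ' '
  · subst hx
    rw [h, List.takeWhile_cons_of_neg (by simp)]
    simp
  · rw [h, take1_head x t hx, if_neg hx]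

-- what A's first pass inserts for one record
def insA (r : String) : Option (List Char × List Char) :=
  if r.toList.head? = some 'E' ∨ r.toList.head? = some 'C'
  then some (findUidAndName r.toList) else none

lemma stepA1_ins (d : PySem.Dict (List Char) (List Char)) (r : String) :
    stepA1 d r = match insA r with
      | some kv => d.insert kv.1 kv.2
      | none => d := by
  unfold stepA1 insA
  rw [pyGet0]
  cases hh : r.toList.head? with
  | none => simp
  | some x =>
    by_cases he : x = 'E'
    · subst he; simp
    · by_cases hc : x = 'C'
      · subst hc; simp
      · have : ¬ (some x = some 'E' ∨ some x = some 'C') := by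
          simp [he, hc]
        simp [he, hc]

-- "first match or default": the value produced by a linear search with default []
def matchVal (p : String → Bool) (f : String → List Char) (l : List String) : List Char :=
  match l.find? p with
  | some s => f s
  | none => []

lemma matchVal_congr (p q : String → Bool) (f g : String → List Char) (l : List String)
    (hp : ∀ s ∈ l, p s = q s) (hf : ∀ s ∈ l, p s = true → f s = g s) :
    matchVal p f l = matchVal q g l := by
  induction l with
  | nil => rfl
  | cons s l ih =>
    have hps := hp s List.mem_cons_self
    unfold matchVal
    by_cases h : p s = true
    · rw [List.find?_cons_of_pos h, List.find?_cons_of_pos (hps ▸ h)]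
      exact hf s List.mem_cons_self h
    · rw [List.find?_cons_of_neg h, List.find?_cons_of_neg (hps ▸ h)]
      exact ih (fun t ht => hp t (List.mem_cons_of_mem s ht))
        (fun t ht => hf t (List.mem_cons_of_mem s ht))

lemma matchVal_nil_of (p : String → Bool) (f : String → List Char) (l : List String)
    (h : ∀ s ∈ l, p s = true → f s = []) : matchVal p f l = [] := by
  induction l with
  | nil => rfl
  | cons s l ih =>
    unfold matchVal
    by_cases hs : p s = true
    · rw [List.find?_cons_of_pos hs]
      exact h s List.mem_cons_self hs
    · rw [List.find?_cons_of_neg hs]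
      exact ih (fun t ht => h t (List.mem_cons_of_mem s ht))

-- A-side search predicate and value: the records inserting key k, and what they insert
def pA (k : List Char) (s : String) : Bool :=
  match insA s with
  | some kv => kv.1 == k
  | none => false

def fA (s : String) : List Char := (findUidAndName s.toList).2

-- the dict built by A's first pass answers by "last insert wins"
lemma get_fold (l : List String) (d : PySem.Dict (List Char) (List Char)) (k : List Char) :
    (l.foldl stepA1 d).get? k
      = match l.reverse.find? (pA k) with
        | some s => some (fA s)
        | none => d.get? k := by
  induction l generalizing d with
  | nil => rfl
  | cons r l ih =>
    simp only [List.foldl_cons, List.reverse_cons]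
    rw [ih, List.find?_append]
    cases hfind : l.reverse.find? (pA k) with
    | some s => simp
    | none =>
      by_cases hp : pA k r = true
      · rw [List.find?_cons_of_pos hp]
        simp only [Option.none_or]
        unfold pA at hp
        cases hins : insA r with
        | none => rw [hins] at hp; simp at hp
        | some kv =>
          rw [hins] at hp
          have hk : kv.1 = k := by simpa using hp
          rw [stepA1_ins, hins]
          simp only
          rw [hk, PySem.Dict.get?_insert_self]
          unfold fA
          unfold insA at hins
          split_ifs at hins with hcond
          simp only [Option.some.injEq] at hins
          rw [← hins]
      · rw [List.find?_cons_of_neg hp, List.find?_nil]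
        simp only [Option.none_or]
        rw [stepA1_ins]
        cases hins : insA r with
        | none => rfl
        | some kv =>
          simp only
          unfold pA at hp
          rw [hins] at hp
          have hk : kv.1 ≠ k := by simpa using hp
          rw [PySem.Dict.get?_insert_of_ne _ _ (Ne.symm hk)]

-- B-side search predicate and value on the raw records
def pB (u : List Char) (s : String) : Bool :=
  ((parseB s).1 == ['E'] || (parseB s).1 == ['C']) && (parseB s).2.1 == u

def fB (s : String) : List Char := (parseB s).2.2

-- B's backwards search, restated over the raw record list
lemma finalNameB_eq (record : List String) (u : List Char) :
    ((finalNameB (record.map parseB) u).getD []) = matchVal (pB u) fB record.reverse := by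
  unfold finalNameB matchVal
  rw [← List.map_reverse, List.find?_map]
  have hpred : ((fun e : List Char × List Char × List Char =>
      (e.1 == ['E'] || e.1 == ['C']) && e.2.1 == u) ∘ parseB) = pB u := rfl
  rw [hpred]
  cases hfind : List.find? (pB u) record.reverse with
  | some s => rfl
  | none => rfl

-- A's dict lookup, restated as the same kind of search
lemma dictA_eq (record : List String) (k : List Char) :
    (((record.foldl stepA1 PySem.Dict.empty).get? k).getD []) = matchVal (pA k) fA record.reverse := by
  rw [get_fold]
  unfold matchVal
  cases record.reverse.find? (pA k) with
  | some s => rfl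
  | none => rfl

-- a spaceless Enter/Change record: A inserts the whole string with name ""
lemma fA_nospace (s : String) (h : ' ' ∉ s.toList) : fA s = [] := by
  unfold fA
  rw [parse_nospace s.toList h]

-- per-event agreement of the two searches, under Pre_'s side conditions
lemma search_eq (record : List String)
    (hper : ∀ r ∈ record, r.toList ≠ [] ∧
      (r.toList.head? = some 'L' → ' ' ∈ r.toList ∧ uidField r ∈ suRec record) ∧
      ((r.toList.head? = some 'E' ∨ r.toList.head? = some 'C') → ' ' ∈ r.toList →
        uidField r ∉ slRec record))
    (hglob : slRec record ≠ [] → [] ∉ suRec record)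
    (r : String) (hr : r ∈ record) (hel : r.toList.head? = some 'E' ∨ r.toList.head? = some 'L') :
    matchVal (pA (findUidAndName r.toList).1) fA record.reverse
      = matchVal (pB (parseB r).2.1) fB record.reverse := by
  have hmemSL : ∀ s ∈ record, (s.toList.head? = some 'E' ∨ s.toList.head? = some 'C') →
      ' ' ∉ s.toList → s.toList ∈ slRec record := by
    intro s hs hx hsp
    exact List.mem_filterMap.2 ⟨s, hs, by rw [if_pos ⟨hx, hsp⟩]⟩
  have hmemSU : ∀ s ∈ record, (s.toList.head? = some 'E' ∨ s.toList.head? = some 'C') →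
      ' ' ∈ s.toList → uidField s ∈ suRec record := by
    intro s hs hx hsp
    exact List.mem_filterMap.2 ⟨s, hs, by rw [if_pos ⟨hx, hsp⟩]⟩
  -- the B-side first conjunct is head-char classification, for nonempty s
  have hcmd : ∀ s ∈ record,
      (((parseB s).1 == ['E'] || (parseB s).1 == ['C']) : Bool)
        = decide (s.toList.head? = some 'E' ∨ s.toList.head? = some 'C') := by
    intro s hs
    obtain ⟨x, t, hcs⟩ : ∃ x t, s.toList = x :: t := by
      cases hcsv : s.toList with
      | nil => exact absurd hcsv (hper s hs).1
      | cons y u => exact ⟨y, u, rfl⟩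
    rw [parseB_cmd s x t hcs]
    by_cases hx : x = ' '
    · subst hx; simp [hcs]
    · rw [if_neg hx]
      by_cases hxe : x = 'E' <;> by_cases hxc : x = 'C' <;> simp [hcs, hxe, hxc]
  by_cases hsp : ' ' ∈ r.toList
  · -- spaced event record: the two searches use the same key and agree pointwise
    have hkeys : (findUidAndName r.toList).1 = uidField r := by
      rw [parse_eq r.toList hsp]; rfl
    have huB : (parseB r).2.1 = uidField r := parseB_uid r
    have hSU : uidField r ∈ suRec record := by
      rcases hel with hx | hx
      · exact hmemSU r hr (Or.inl hx) hsp
      · exact ((hper r hr).2.1 hx).2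
    have hnotSL : uidField r ∉ slRec record := by
      obtain ⟨s, hs, hcond⟩ := List.mem_filterMap.1 hSU
      by_cases hc : (s.toList.head? = some 'E' ∨ s.toList.head? = some 'C') ∧ ' ' ∈ s.toList
      · rw [if_pos hc] at hcond
        have heq : uidField s = uidField r := by simpa using hcond
        exact heq ▸ (hper s hs).2.2 hc.1 hc.2
      · rw [if_neg hc] at hcond; simp at hcond
    rw [hkeys, huB]
    apply matchVal_congr
    · -- predicates agree on every record
      intro s hs'
      have hs : s ∈ record := List.mem_reverse.1 hs'
      unfold pA pB insA
      rw [hcmd s hs, parseB_uid s]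
      by_cases hx : s.toList.head? = some 'E' ∨ s.toList.head? = some 'C'
      · rw [if_pos hx]
        simp only [hx, decide_true, Bool.true_and]
        by_cases hssp : ' ' ∈ s.toList
        · have : (findUidAndName s.toList).1 = uidField s := by
            rw [parse_eq s.toList hssp]; rfl
          rw [this]
        · -- spaceless E/C record: A compares the whole string, B the empty uid; both fail
          rw [parse_nospace s.toList hssp]
          have h1 : (s.toList == uidField r) = false := by
            simp only [beq_eq_false_iff_ne, ne_eq]
            intro h
            exact hnotSL (h ▸ hmemSL s hs hx hssp)
          have h2 : (uidField s == uidField r) = false := by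
            have hSLne : slRec record ≠ [] := by
              intro h0
              have := hmemSL s hs hx hssp
              rw [h0] at this
              simp at this
            have hu0 : uidField r ≠ [] := by
              intro h0
              exact hglob hSLne (h0 ▸ hSU)
            have : uidField s = [] := by
              unfold uidField
              have := partition_nospace s.toList hssp
              unfold pyPartitionSpace at this
              have h2' := congrArg Prod.snd this
              simp only at h2'
              rw [h2']
              rfl
            simp only [this, beq_eq_false_iff_ne, ne_eq]
            exact fun h => hu0 h.symm
          simp only
          rw [h1, h2]
      · rw [if_neg hx]
        simp [hx]
    · -- values agree on every match
      intro s hs' hps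
      have hs : s ∈ record := List.mem_reverse.1 hs'
      unfold pA insA at hps
      by_cases hx : s.toList.head? = some 'E' ∨ s.toList.head? = some 'C'
      · by_cases hssp : ' ' ∈ s.toList
        · unfold fA fB
          rw [parse_eq s.toList hssp]
          rfl
        · -- spaceless matches are impossible (key would be the whole string ∈ slRec)
          rw [if_pos hx] at hps
          simp only [beq_iff_eq] at hps
          rw [parse_nospace s.toList hssp] at hps
          exact absurd (hps ▸ hmemSL s hs hx hssp) hnotSL
      · rw [if_neg hx] at hps
        simp at hps
  · -- spaceless event record (necessarily Enter): both searches produce ""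
    have hx : r.toList.head? = some 'E' := by
      rcases hel with hx | hx
      · exact hx
      · exact absurd ((hper r hr).2.1 hx).1 hsp
    have hSL : r.toList ∈ slRec record := hmemSL r hr (Or.inl hx) hsp
    have hSLne : slRec record ≠ [] := by
      intro h0; rw [h0] at hSL; simp at hSL
    rw [matchVal_nil_of, matchVal_nil_of]
    · -- B side: every match is a spaceless E/C record, whose name is ""
      intro s hs' hps
      have hs : s ∈ record := List.mem_reverse.1 hs'
      unfold pB at hps
      simp only [Bool.and_eq_true] at hps
      by_cases hssp : ' ' ∈ s.toList
      · -- a spaced match would put [] into suRec, contradicting Pre_'s global clause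
        exfalso
        have hcmds := hps.1
        rw [hcmd s hs] at hcmds
        have hxs : s.toList.head? = some 'E' ∨ s.toList.head? = some 'C' := by
          simpa using hcmds
        have huB : (parseB r).2.1 = [] := by
          rw [parseB_nospace r hsp]
        have : uidField s = [] := by
          have := hps.2
          rw [parseB_uid s, huB] at this
          simpa using this
        exact hglob hSLne (this ▸ hmemSU s hs hxs hssp)
      · unfold fB
        rw [parseB_nospace s hssp]
    · -- A side: every match is spaceless (a spaced match's uid field would be in slRec)
      intro s hs' hps
      have hs : s ∈ record := List.mem_reverse.1 hs'
      unfold pA insA at hps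
      by_cases hxs : s.toList.head? = some 'E' ∨ s.toList.head? = some 'C'
      · by_cases hssp : ' ' ∈ s.toList
        · exfalso
          rw [if_pos hxs] at hps
          simp only [beq_iff_eq] at hps
          have hkeyA : (findUidAndName r.toList).1 = r.toList := by
            rw [parse_nospace r.toList hsp]
          have hkeyS : (findUidAndName s.toList).1 = uidField s := by
            rw [parse_eq s.toList hssp]; rfl
          rw [hkeyA, hkeyS] at hps
          exact (hper s hs).2.2 hxs hssp (hps ▸ hSL)
        · exact fA_nospace s hssp
      · rw [if_neg hxs] at hps
        simp at hps

-- one step of the two second passes agree, given the looked-up names agree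
lemma step2_eq (dA : PySem.Dict (List Char) (List Char))
    (parsed : List (List Char × List Char × List Char)) (ans : List String) (r : String)
    (hne : r.toList ≠ [])
    (hval : (r.toList.head? = some 'E' ∨ r.toList.head? = some 'L') →
      (dA.get? (findUidAndName r.toList).1).getD []
        = (finalNameB parsed (parseB r).2.1).getD []) :
    stepA2 dA ans r = stepBemit parsed ans (parseB r) := by
  obtain ⟨x, t, hcs⟩ : ∃ x t, r.toList = x :: t := by
    cases hcsv : r.toList with
    | nil => exact absurd hcsv hne
    | cons y s => exact ⟨y, s, rfl⟩
  have hget : PySem.Str.pyGet? r 0 = some x := by rw [pyGet0, hcs]; rfl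
  have hcmd := parseB_cmd r x t hcs
  simp only [stepA2, stepBemit, hget]
  by_cases hx : x = ' '
  · subst hx
    rw [if_pos rfl] at hcmd
    rw [hcmd]
    simp
  · rw [if_neg hx] at hcmd
    rw [hcmd]
    by_cases hxe : x = 'E'
    · subst hxe
      have hv := hval (Or.inl (by rw [hcs]; rfl))
      simp [hv]
    · by_cases hxl : x = 'L'
      · subst hxl
        have hv := hval (Or.inr (by rw [hcs]; rfl))
        have hne' : (['L'] : List Char) ≠ ['E'] := by decide
        simp [hne', hv]
      · have h1 : ([x] : List Char) ≠ ['E'] := by simp [hxe]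
        have h2 : ([x] : List Char) ≠ ['L'] := by simp [hxl]
        simp [hxe, hxl, h1, h2]

-- the whole second passes agree
lemma fold2_eq (dA : PySem.Dict (List Char) (List Char))
    (parsed : List (List Char × List Char × List Char)) (l : List String) (ans : List String)
    (h : ∀ r ∈ l, r.toList ≠ [] ∧
      ((r.toList.head? = some 'E' ∨ r.toList.head? = some 'L') →
        (dA.get? (findUidAndName r.toList).1).getD []
          = (finalNameB parsed (parseB r).2.1).getD [])) :
    l.foldl (stepA2 dA) ans = l.foldl (fun a r => stepBemit parsed a (parseB r)) ans := by
  induction l generalizing ans with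
  | nil => rfl
  | cons r l ih =>
    obtain ⟨h1, h2⟩ := h r List.mem_cons_self
    simp only [List.foldl_cons]
    rw [step2_eq dA parsed ans r h1 h2]
    exact ih _ (fun s hs => h s (List.mem_cons_of_mem r hs))

-- ===== VERDICT (by name: the statement is the Claim_ definition above) =====
theorem solution_spec : Claim_equal_solution := by
  intro record _hdom hpre
  obtain ⟨hper, hglob⟩ := hpre
  unfold Spec_solution solution solution_alt
  rw [List.foldl_map]
  apply fold2_eq
  intro r hr
  refine ⟨(hper r hr).1, fun hel => ?_⟩
  rw [dictA_eq, finalNameB_eq]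
  exact search_eq record hper hglob r hr hel
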